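-- pv_equiv track=rewrite | github.com/peroksid/aoc-22 | rest_days/day12_star1.py | find_points_in_lines
-- ===== SOURCE A (Python) =====
-- from collections import namedtuple
--
-- Point = namedtuple("Point", ["x", "y"])
--
-- def find_points_in_lines(lines: list[str], targets: list[str]) -> list[Point]:
--     results = [None for _ in targets]
--     indexes: dict[str, int] = {v: k for (k, v) in enumerate(targets)}
--
--     for line_index, line in enumerate(lines):
--         for char_index, char in enumerate(line):
--             if char in indexes:
--                 results[indexes[char]] = Point(char_index, line_index)
--
--     assert all([x is not None for x in results]), results
--     return results
-- ===== SOURCE B (Python) =====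
-- from collections import namedtuple
--
-- Point = namedtuple("Point", ["x", "y"])
--
-- def find_points_in_lines(lines: list[str], targets: list[str]) -> list[Point]:
--     def last_pos(t):
--         for y, line in reversed(list(enumerate(lines))):
--             for x, ch in reversed(list(enumerate(line))):
--                 if ch == t:
--                     return Point(x, y)
--         return None
--     return [last_pos(t) for t in targets]
-- ===== Notes on version B (the rewrite author's own statement) =====
-- stated objective: alternative
-- what changed: B drops A's target-index dict and single forward grid pass with guarded writes into a preallocated results list; instead it searches the grid backwards (last line first, right to left) once per target and returns the first hit, i.e. a per-target early-exit reverse search with no dict at all.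
import Mathlib
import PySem

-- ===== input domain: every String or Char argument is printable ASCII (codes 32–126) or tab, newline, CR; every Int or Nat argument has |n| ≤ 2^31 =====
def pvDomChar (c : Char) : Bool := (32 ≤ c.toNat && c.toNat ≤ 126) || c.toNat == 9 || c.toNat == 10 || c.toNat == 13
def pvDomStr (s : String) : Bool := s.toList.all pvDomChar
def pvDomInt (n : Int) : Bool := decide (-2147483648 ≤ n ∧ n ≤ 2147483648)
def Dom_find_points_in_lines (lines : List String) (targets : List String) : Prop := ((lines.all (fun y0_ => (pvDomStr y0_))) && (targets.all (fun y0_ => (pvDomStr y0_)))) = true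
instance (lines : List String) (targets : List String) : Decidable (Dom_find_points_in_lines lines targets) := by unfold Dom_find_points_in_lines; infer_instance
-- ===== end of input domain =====

-- B replaces A's target-index dict + forward grid pass with guarded writes into a
-- preallocated results list by a dict-free per-target backward early-exit search
-- (last line first, right to left, first hit wins) (objective: alternative).


-- ===== PORT A =====
-- indexes = {v: k for (k, v) in enumerate(targets)}
def fpIndexes (targets : List String) : PySem.Dict String Int :=
  (PySem.List.enumerate targets 0).foldl (fun d p => d.insert p.2 p.1) PySem.Dict.empty

-- literal port of A; the final assert raises exactly outside Pre_, where nothing is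
-- claimed (under Pre_ every entry is some, so the getD default is never read)
def find_points_in_lines (lines : List String) (targets : List String) : List (Int × Int) :=
  ((PySem.List.enumerate lines 0).foldl (fun res p =>
      (PySem.List.enumerate p.2.toList 0).foldl (fun res q =>
        if (fpIndexes targets).contains (String.ofList [q.2]) then
          PySem.List.pySetD res ((fpIndexes targets).getD (String.ofList [q.2]) 0) (some (q.1, p.1))
        else res) res)
    (targets.map (fun _ => none))).map (fun o => o.getD (0, 0))

-- ===== PORT B =====
-- last_pos(t): scan reversed(list(enumerate(lines))), then reversed(list(enumerate(line))),
-- return the first Point(x, y) with ch == t; findSome? is that first-hit loop.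
-- Python's last_pos returns None only when t never occurs, which Pre_ excludes,
-- so the getD default is never read.
def find_points_in_lines_alt (lines : List String) (targets : List String) : List (Int × Int) :=
  targets.map (fun t =>
    ((PySem.List.enumerate lines 0).reverse.findSome? (fun p =>
      (PySem.List.enumerate p.2.toList 0).reverse.findSome? (fun q =>
        if String.ofList [q.2] == t then some (q.1, p.1) else none))).getD (0, 0))

-- ===== PRECONDITION & SPEC =====
-- Pre_: exactly where Python A returns: no duplicate targets (a duplicate's earlier
-- slot stays None → AssertionError) and every target is a single character occurring
-- somewhere in the grid (otherwise its slot stays None → AssertionError).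
def Pre_find_points_in_lines (lines : List String) (targets : List String) : Prop :=
  targets.Nodup ∧
    (targets.all (fun t => lines.any (fun line => line.toList.any (fun c => t.toList == [c])))) = true
instance (lines : List String) (targets : List String) : Decidable (Pre_find_points_in_lines lines targets) := by unfold Pre_find_points_in_lines; infer_instance

def pvWitness_find_points_in_lines : List String × List String := (["ab", "ca"], ["a", "b", "c"])

def Spec_find_points_in_lines (lines : List String) (targets : List String) (out : List (Int × Int)) : Prop := out = find_points_in_lines_alt lines targets
instance (lines : List String) (targets : List String) (out : List (Int × Int)) : Decidable (Spec_find_points_in_lines lines targets out) := by unfold Spec_find_points_in_lines; infer_instance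

-- ===== CLAIM (what is proved, stated in full; the proofs are below) =====
def Claim_equal_find_points_in_lines : Prop := ∀ (lines : List String) (targets : List String), Dom_find_points_in_lines lines targets → Pre_find_points_in_lines lines targets → Spec_find_points_in_lines lines targets (find_points_in_lines lines targets)

-- ===== LEMMAS AND PROOFS =====

-- pointwise last-wins update, the abstract meaning of one write of A's scan
def updS (f : String → Option (Int × Int)) (e : String × (Int × Int)) : String → Option (Int × Int) :=
  fun s => if s == e.1 then some e.2 else f s

-- the grid flattened to scan order: (one-char string, position)
def allScan (lines : List String) : List (String × (Int × Int)) :=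
  (PySem.List.enumerate lines 0).flatMap (fun p =>
    (PySem.List.enumerate p.2.toList 0).map (fun q => (String.ofList [q.2], (q.1, p.1))))

def gFind (t : String) (e : String × (Int × Int)) : Option (Int × Int) :=
  if e.1 == t then some e.2 else none

-- membership in enumerate
theorem mem_enumerate_iff {α : Type} (xs : List α) (s j : Int) (x : α) :
    (j, x) ∈ PySem.List.enumerate xs s ↔ ∃ n : Nat, n < xs.length ∧ j = s + n ∧ xs[n]? = some x := by
  induction xs generalizing s with
  | nil => simp [PySem.List.enumerate_nil]
  | cons y ys ih =>
    simp only [PySem.List.enumerate_cons, List.mem_cons, Prod.mk.injEq, ih]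
    constructor
    · rintro (⟨rfl, rfl⟩ | ⟨n, hn, rfl, hg⟩)
      · exact ⟨0, by simp⟩
      · exact ⟨n + 1, by simpa using hn, by push_cast; ring, by simpa using hg⟩
    · rintro ⟨n, hn, rfl, hg⟩
      cases n with
      | zero => left; simp_all
      | succ m => right; exact ⟨m, by simpa using hn, by push_cast; ring, by simpa using hg⟩

-- the 'indexes' dict of port A maps each target to its (unique) index, under Nodup
theorem fpIndexes_get? (targets : List String) (hnd : targets.Nodup) (k : String) :
    (fpIndexes targets).get? k = if k ∈ targets then some (targets.idxOf k : Int) else none := by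
  have hfresh : ∀ p ∈ PySem.List.enumerate targets 0, (PySem.Dict.empty : PySem.Dict String Int).contains p.2 = false := by
    intro p _; simp [pysem]
  have hmapnd : ((PySem.List.enumerate targets 0).map (·.2)).Nodup := by
    rw [PySem.List.map_snd_enumerate]; exact hnd
  have hitems := PySem.Dict.items_foldl_insert_fresh (l := PySem.List.enumerate targets 0)
    (k := (·.2)) (v := (·.1)) (d := PySem.Dict.empty) hfresh hmapnd
  have hkeys : (fpIndexes targets).keys = targets := by
    show ((fpIndexes targets).items.map (·.1)) = targets
    unfold fpIndexes
    rw [hitems]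
    have he : (PySem.Dict.empty : PySem.Dict String Int).items = [] := rfl
    rw [List.map_append, he, List.map_map, List.map_nil, List.nil_append]
    exact PySem.List.map_snd_enumerate targets 0
  have hknd : (fpIndexes targets).keys.Nodup := by rw [hkeys]; exact hnd
  by_cases h : k ∈ targets
  · simp only [h, if_pos]
    have hidx : targets.idxOf k < targets.length := List.idxOf_lt_length_of_mem h
    have hmem : (k, (targets.idxOf k : Int)) ∈ (fpIndexes targets).items := by
      unfold fpIndexes
      rw [hitems]
      simp only [List.mem_append, List.mem_map]
      right
      refine ⟨((targets.idxOf k : Int), k), ?_, rfl⟩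
      rw [mem_enumerate_iff]
      exact ⟨targets.idxOf k, hidx, by simp, by simp [List.getElem?_eq_getElem hidx, List.getElem_idxOf]⟩
    exact PySem.Dict.get?_of_mem_items _ hmem hknd
  · simp only [h, if_neg, not_false_iff]
    rw [PySem.Dict.get?_eq_none_iff_not_mem_keys, hkeys]
    exact h

-- the invariant tying A's results list to the abstract last-wins function
def InvFP (targets : List String) (res : List (Option (Int × Int))) (f : String → Option (Int × Int)) : Prop :=
  res.length = targets.length ∧ ∀ (i : Nat) (h : i < targets.length) (h' : i < res.length),
    res[i]'h' = f (targets[i]'h)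

theorem invFP_step (targets : List String) (hnd : targets.Nodup)
    (res : List (Option (Int × Int))) (f : String → Option (Int × Int))
    (k : String) (pt : Int × Int) (hinv : InvFP targets res f) :
    InvFP targets
      (if (fpIndexes targets).contains k then
         PySem.List.pySetD res ((fpIndexes targets).getD k 0) (some pt)
       else res)
      (updS f (k, pt)) := by
  obtain ⟨hlen, hval⟩ := hinv
  have hget := fpIndexes_get? targets hnd k
  by_cases hk : k ∈ targets
  · have hcont : (fpIndexes targets).contains k = true := by
      rw [PySem.Dict.contains_eq_isSome_get?, hget]; simp [hk]
    have hgd : (fpIndexes targets).getD k 0 = (targets.idxOf k : Int) := by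
      rw [PySem.Dict.getD_eq_get?_getD, hget]; simp [hk]
    rw [if_pos hcont, hgd, PySem.List.pySetD_natCast]
    constructor
    · simpa using hlen
    · intro i h h'
      rw [List.length_set] at h'
      by_cases hi : i = targets.idxOf k
      · subst hi
        rw [List.getElem_set_self]
        have ht : targets[targets.idxOf k]'h = k := List.getElem_idxOf _
        simp [updS, ht]
      · have hne : targets[i]'h ≠ k := by
          intro he
          apply hi
          have : targets[i]'h = targets[targets.idxOf k]'(List.idxOf_lt_length_of_mem hk) := by
            rw [he, List.getElem_idxOf]
          exact hnd.getElem_inj_iff.mp this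
        rw [List.getElem_set_ne (by omega)]
        simp only [updS]
        rw [if_neg (by simpa using hne)]
        exact hval i h h'
  · have hcont : (fpIndexes targets).contains k = false := by
      rw [PySem.Dict.contains_eq_isSome_get?, hget]; simp [hk]
    rw [if_neg (by simp [hcont])]
    refine ⟨hlen, fun i h h' => ?_⟩
    have hne : targets[i]'h ≠ k := fun he => hk (he ▸ List.getElem_mem h)
    simp only [updS]
    rw [if_neg (by simpa using hne)]
    exact hval i h h'

-- folding any list in lockstep preserves the invariant
theorem invFP_foldl {α : Type} (targets : List String)
    (fA : List (Option (Int × Int)) → α → List (Option (Int × Int)))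
    (fB : (String → Option (Int × Int)) → α → (String → Option (Int × Int)))
    (hstep : ∀ res f x, InvFP targets res f → InvFP targets (fA res x) (fB f x))
    (l : List α) : ∀ res f, InvFP targets res f → InvFP targets (l.foldl fA res) (l.foldl fB f) := by
  induction l with
  | nil => intro res f h; simpa using h
  | cons x xs ih => intro res f h; exact ih _ _ (hstep _ _ _ h)

-- a left fold of last-wins updates reads back as a first hit of the reversed list
theorem updS_read (f : String → Option (Int × Int)) (e : String × (Int × Int)) (t : String) :
    updS f e t = (gFind t e).or (f t) := by
  simp only [updS, gFind, beq_iff_eq]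
  by_cases h : t = e.1
  · simp [h]
  · simp [Ne.symm h]
    exact fun hh => absurd hh h

theorem findSome?_singleton' (t : String) (e : String × (Int × Int)) :
    List.findSome? (gFind t) [e] = gFind t e := by
  cases h : gFind t e <;> simp [List.findSome?, h]

theorem foldl_updS_eq (l : List (String × (Int × Int))) :
    ∀ (f : String → Option (Int × Int)) (t : String),
      (l.foldl updS f) t = (l.reverse.findSome? (gFind t)).or (f t) := by
  induction l with
  | nil => intro f t; simp
  | cons e l' ih =>
    intro f t
    rw [List.foldl_cons, ih, updS_read, List.reverse_cons, List.findSome?_append,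
      findSome?_singleton', Option.or_assoc]

-- ===== VERDICT (by name: the statement is the Claim_ definition above) =====
theorem find_points_in_lines_spec : Claim_equal_find_points_in_lines := by
  intro lines targets _ hpre
  obtain ⟨hnd, _⟩ := hpre
  unfold Spec_find_points_in_lines find_points_in_lines find_points_in_lines_alt
  -- A's fold tracks the abstract last-wins function over the flattened scan
  have hinv : InvFP targets
      ((PySem.List.enumerate lines 0).foldl (fun res p =>
        (PySem.List.enumerate p.2.toList 0).foldl (fun res q =>
          if (fpIndexes targets).contains (String.ofList [q.2]) then
            PySem.List.pySetD res ((fpIndexes targets).getD (String.ofList [q.2]) 0) (some (q.1, p.1))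
          else res) res) (targets.map (fun _ => none)))
      ((allScan lines).foldl updS (fun _ => none)) := by
    unfold allScan
    rw [List.foldl_flatMap]
    apply invFP_foldl
    · intro res f p hin
      rw [List.foldl_map]
      apply invFP_foldl
      · intro res' f' q hin'
        exact invFP_step targets hnd res' f' (String.ofList [q.2]) (q.1, p.1) hin'
      · exact hin
    · exact ⟨by simp, fun i h h' => by simp⟩
  obtain ⟨hlen, hval⟩ := hinv
  -- B's nested backward search is a first hit of the reversed flattened scan
  have hB : ∀ t : String,
      (allScan lines).reverse.findSome? (gFind t) =
        (PySem.List.enumerate lines 0).reverse.findSome? (fun p =>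
          (PySem.List.enumerate p.2.toList 0).reverse.findSome? (fun q =>
            if String.ofList [q.2] == t then some (q.1, p.1) else none)) := by
    intro t
    unfold allScan
    rw [List.reverse_flatMap]
    induction (PySem.List.enumerate lines 0).reverse with
    | nil => simp
    | cons p ps ihp =>
      simp only [List.flatMap_cons, List.findSome?_append, List.findSome?_cons, Function.comp,
        ← List.map_reverse, List.findSome?_map, ihp]
      have hg : (gFind t ∘ fun q : Int × Char => (String.ofList [q.2], (q.1, p.1))) =
          (fun q : Int × Char => if String.ofList [q.2] == t then some (q.1, p.1) else none) := rfl
      rw [hg]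
      cases h : (PySem.List.enumerate p.2.toList 0).reverse.findSome?
          (fun q => if String.ofList [q.2] == t then some (q.1, p.1) else none)
      · simp [Option.or]
      · simp [Option.or]
  apply List.ext_getElem
  · simpa using hlen
  · intro i h1 h2
    simp only [List.getElem_map]
    rw [hval i (by simpa using h2) (by simpa using h1), foldl_updS_eq, hB]
    simp
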